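-- pv_equiv track=rewrite | github.com/Kumarkad/competitive-programming- | geeksforgeeks/Unique Number of Occurrences/Solution.py | isFrequencyUnique
-- ===== SOURCE A (Python) =====
-- from typing import List
--
-- def isFrequencyUnique(n : int, arr : List[int]) -> bool:
--     # code here
--     countset=set()
--     seenset=set()
--
--     for i in arr:
--         if i in seenset:
--             continue
--         frequency=arr.count(i)
--         if frequency in countset:
--             return False
--         seenset.add(i)
--         countset.add(frequency)
--     return True
-- ===== SOURCE B (Python) =====
-- def isFrequencyUnique(n, arr):
--     counts = {}
--     for x in arr:
--         counts[x] = counts.get(x, 0) + 1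
--     freqs = sorted(counts.values())
--     for prev, cur in zip(freqs, freqs[1:]):
--         if cur == prev:
--             return False
--     return True
-- ===== Notes on version B (the rewrite author's own statement) =====
-- stated objective: alternative
-- what changed: Replaces A's per-element arr.count rescans plus set-membership collision test with a one-pass frequency dict whose counts are sorted and scanned over adjacent pairs for a repeat.
import Mathlib
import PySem

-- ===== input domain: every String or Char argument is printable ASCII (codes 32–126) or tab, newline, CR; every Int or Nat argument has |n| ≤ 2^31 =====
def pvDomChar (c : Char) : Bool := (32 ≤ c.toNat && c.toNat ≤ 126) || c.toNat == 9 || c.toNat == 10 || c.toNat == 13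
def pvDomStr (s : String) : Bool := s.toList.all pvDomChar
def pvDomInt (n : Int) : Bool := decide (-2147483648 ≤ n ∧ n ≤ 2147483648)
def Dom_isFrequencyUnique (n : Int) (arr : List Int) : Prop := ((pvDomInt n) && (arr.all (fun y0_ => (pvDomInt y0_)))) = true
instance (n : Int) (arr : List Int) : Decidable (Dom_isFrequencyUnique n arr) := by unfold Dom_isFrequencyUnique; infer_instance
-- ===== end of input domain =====

-- B replaces A's per-element arr.count rescans by a one-pass count dict, then sorts the
-- counts and scans adjacent pairs for a repeat (alternative algorithm, same return value).

-- ===== PORT A =====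
-- A's for-loop with early return; state = (countset, seenset)
def pvLoopA (arr : List Int) : List Int → PySem.Set Int → PySem.Set Int → Bool
  | [], _, _ => true
  | i :: rest, countset, seenset =>
    if PySem.Set.contains seenset i then pvLoopA arr rest countset seenset
    else
      let frequency : Int := (PySem.List.count arr i : Int)
      if PySem.Set.contains countset frequency then false
      else pvLoopA arr rest (PySem.Set.add countset frequency) (PySem.Set.add seenset i)

def isFrequencyUnique (n : Int) (arr : List Int) : Bool :=
  pvLoopA arr arr PySem.Set.empty PySem.Set.empty

-- ===== PORT B =====
-- Source B's 'for prev, cur in zip(freqs, freqs[1:])' adjacent-pair loop with early return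
def pvAdjLoop : List Int → Bool
  | prev :: cur :: rest => if cur == prev then false else pvAdjLoop (cur :: rest)
  | _ => true

def isFrequencyUnique_alt (n : Int) (arr : List Int) : Bool :=
  let counts : PySem.Dict Int Int :=
    arr.foldl (fun d x => d.insert x (d.getD x 0 + 1)) PySem.Dict.empty
  let freqs := PySem.List.sorted (PySem.Dict.values counts) (fun v => v) false
  pvAdjLoop freqs

-- ===== PRECONDITION & SPEC =====
def Spec_isFrequencyUnique (n : Int) (arr : List Int) (out : Bool) : Prop := out = isFrequencyUnique_alt n arr
instance (n : Int) (arr : List Int) (out : Bool) : Decidable (Spec_isFrequencyUnique n arr out) := by unfold Spec_isFrequencyUnique; infer_instance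

-- ===== CLAIM (what is proved, stated in full; the proofs are below) =====
def Claim_equal_isFrequencyUnique : Prop := ∀ (n : Int) (arr : List Int), Dom_isFrequencyUnique n arr → Spec_isFrequencyUnique n arr (isFrequencyUnique n arr)

-- ===== LEMMAS AND PROOFS =====

-- a set only grows (by appending) under update
theorem pv_update_prefix (l : List Int) : ∀ (s : PySem.Set Int), s <+: PySem.Set.update s l := by
  induction l with
  | nil => intro s; simp [PySem.Set.update]
  | cons x l ih =>
    intro s
    rw [PySem.Set.update_cons]
    refine List.IsPrefix.trans ?_ (ih (PySem.Set.add s x))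
    rw [PySem.Set.add_eq_ite]
    split_ifs
    · exact List.prefix_rfl
    · exact List.prefix_append s [x]

-- A's loop decides Nodup of the frequency list of the final seen set
theorem pvLoopA_char (arr : List Int) (rest : List Int) :
    ∀ (ss : PySem.Set Int),
      (ss.map (fun x => ((arr.count x : Int)))).Nodup →
      pvLoopA arr rest (ss.map (fun x => ((arr.count x : Int)))) ss
        = decide (((PySem.Set.update ss rest).map (fun x => ((arr.count x : Int)))).Nodup) := by
  induction rest with
  | nil =>
    intro ss hnd
    simp [pvLoopA, PySem.Set.update, hnd]
  | cons i rest ih =>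
    intro ss hnd
    rw [pvLoopA]
    simp only [PySem.List.count_eq]
    by_cases hmem : i ∈ ss
    · rw [if_pos ((PySem.Set.contains_iff _ _).mpr hmem)]
      rw [PySem.Set.update_cons, PySem.Set.add_of_mem hmem]
      exact ih ss hnd
    · rw [if_neg (by simp [hmem])]
      by_cases hf : ((arr.count i : Int)) ∈ ss.map (fun x => ((arr.count x : Int)))
      · rw [if_pos ((PySem.Set.contains_iff _ _).mpr hf)]
        -- collision now: the final frequency list has a duplicate
        have hpre : (ss ++ [i]) <+: PySem.Set.update (ss ++ [i]) rest := pv_update_prefix rest _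
        have hsub : ((ss ++ [i]).map (fun x => ((arr.count x : Int)))).Sublist
            ((PySem.Set.update (ss ++ [i]) rest).map (fun x => ((arr.count x : Int)))) :=
          (hpre.sublist).map _
        have hdup : ¬ ((ss ++ [i]).map (fun x => ((arr.count x : Int)))).Nodup := by
          simp only [List.map_append, List.map_cons, List.map_nil, List.nodup_append]
          intro h
          exact h.2.2 _ hf _ (List.mem_singleton_self _) rfl
        have : ¬ ((PySem.Set.update (ss ++ [i]) rest).map (fun x => ((arr.count x : Int)))).Nodup :=
          fun h => hdup (h.sublist hsub)
        rw [PySem.Set.update_cons, PySem.Set.add_of_not_mem hmem]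
        simp [this]
      · rw [if_neg (by simpa [PySem.Set.contains_iff] using hf)]
        have hadd : PySem.Set.add (ss.map (fun x => ((arr.count x : Int)))) ((arr.count i : Int))
            = (ss ++ [i]).map (fun x => ((arr.count x : Int))) := by
          rw [PySem.Set.add_of_not_mem hf]; simp
        have hnd' : ((ss ++ [i]).map (fun x => ((arr.count x : Int)))).Nodup := by
          simp only [List.map_append, List.map_cons, List.map_nil]
          exact List.Nodup.append hnd (List.nodup_singleton _)
            (by simpa [List.disjoint_singleton] using hf)
        rw [hadd, PySem.Set.add_of_not_mem hmem]
        rw [ih (ss ++ [i]) hnd']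
        rw [PySem.Set.update_cons, PySem.Set.add_of_not_mem hmem]

-- Source B's adjacent-pair scan decides Nodup on a ≤-sorted list
theorem pvAdjLoop_sorted : ∀ (l : List Int), l.Pairwise (· ≤ ·) → pvAdjLoop l = decide l.Nodup := by
  intro l
  induction l with
  | nil => intro _; simp [pvAdjLoop]
  | cons a t ih =>
    intro hp
    cases t with
    | nil => simp [pvAdjLoop]
    | cons b rest =>
      rw [pvAdjLoop]
      by_cases hab : b = a
      · subst hab
        rw [if_pos (by simp)]
        simp [List.nodup_cons]
      · rw [if_neg (by simp [hab])]
        have hp' : (b :: rest).Pairwise (· ≤ ·) := hp.tail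
        rw [ih hp']
        have hle : ∀ x ∈ b :: rest, a ≤ x := fun x hx => (List.pairwise_cons.mp hp).1 x hx
        have hblt : a < b := lt_of_le_of_ne (hle b (by simp)) (fun h => hab h.symm)
        have hnot : a ∉ b :: rest := by
          intro hmem
          rcases List.mem_cons.mp hmem with h | h
          · exact hab h.symm
          · have : b ≤ a := (List.pairwise_cons.mp hp').1 a h
            exact absurd (lt_of_lt_of_le hblt this) (lt_irrefl a)
        simp [List.nodup_cons, hnot]

theorem isFrequencyUnique_spec : Claim_equal_isFrequencyUnique := by
  intro n arr _
  unfold Spec_isFrequencyUnique isFrequencyUnique isFrequencyUnique_alt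
  -- A side
  have hA : pvLoopA arr arr PySem.Set.empty PySem.Set.empty
      = decide (((PySem.Set.ofList arr).map (fun x => ((arr.count x : Int)))).Nodup) := by
    have := pvLoopA_char arr arr PySem.Set.empty (by simp [PySem.Set.empty])
    simpa [PySem.Set.empty, PySem.Set.update_nil_left] using this
  -- B side
  have hvals : PySem.Dict.values (arr.foldl (fun d x => d.insert x (d.getD x 0 + 1)) PySem.Dict.empty)
      = (PySem.Set.ofList arr).map (fun x => ((arr.count x : Int))) := by
    rw [PySem.Dict.foldl_insert_getD_add_one_eq_counter]
    show (PySem.Dict.items (PySem.Dict.counter arr)).map (·.2) = _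
    rw [PySem.Dict.items_counter]
    simp
  set F := (PySem.Set.ofList arr).map (fun x => ((arr.count x : Int))) with hF
  have hperm : (PySem.List.sorted F (fun v => v) false).Perm F := PySem.List.sorted_perm F _ _
  have hB : pvAdjLoop (PySem.List.sorted F (fun v => v) false) = decide F.Nodup := by
    rw [pvAdjLoop_sorted _ (PySem.List.sorted_pairwise F (fun v => v))]
    simp [hperm.nodup_iff]
  simp only [hvals, hB, hA]
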